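-- pv_equiv track=rewrite | github.com/WorkWithSoham/Programming-Problems | Codeforces/1200_Permutation_Transformation.py | find_depth
-- ===== SOURCE A (Python) =====
-- def find_depth(numbers, depth):
--     if len(numbers) == 0:
--         return []
--     max_n_index = 0
--     for index in range(len(numbers)):
--         if numbers[index] == max(numbers):
--             max_n_index = index
--             break
--     numbers[max_n_index] = depth
--     depth += 1
--     return find_depth(numbers[:max_n_index], depth) + [numbers[max_n_index]] + find_depth(numbers[max_n_index+1:], depth)
-- ===== SOURCE B (Python) =====
-- def find_depth(numbers, depth):
--     n = len(numbers)
--     res = []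
--     for i in range(n):
--         d = depth
--         m = numbers[i]
--         for j in range(i - 1, -1, -1):
--             if numbers[j] >= m:
--                 d += 1
--                 m = numbers[j]
--         m = numbers[i]
--         for j in range(i + 1, n):
--             if numbers[j] > m:
--                 d += 1
--                 m = numbers[j]
--         res.append(d)
--     return res
-- ===== Notes on version B (the rewrite author's own statement) =====
-- stated objective: faster
-- what changed: A recursively finds the maximum (re-scanning with max() inside the index loop) and recurses on list slices; B makes no recursion and no slices: for each position it counts its Cartesian-tree ancestors with two running-max scans (left with >=, right with >), giving depth + ancestor count directly.
import Mathlib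
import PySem

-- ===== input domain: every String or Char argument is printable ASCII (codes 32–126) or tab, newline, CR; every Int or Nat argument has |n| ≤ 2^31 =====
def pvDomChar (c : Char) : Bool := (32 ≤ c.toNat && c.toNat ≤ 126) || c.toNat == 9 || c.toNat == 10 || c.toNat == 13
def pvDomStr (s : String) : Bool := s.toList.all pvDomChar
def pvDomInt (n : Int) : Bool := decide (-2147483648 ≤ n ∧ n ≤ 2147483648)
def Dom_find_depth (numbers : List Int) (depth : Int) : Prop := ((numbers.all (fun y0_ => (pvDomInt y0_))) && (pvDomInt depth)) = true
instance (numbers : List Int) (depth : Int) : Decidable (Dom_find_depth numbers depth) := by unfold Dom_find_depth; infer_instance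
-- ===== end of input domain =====

-- B replaces A's divide-and-conquer (argmax, recurse on slices) by directly counting, for each
-- position, its Cartesian-tree ancestors with two running-max scans; equivalence of RETURN values
-- (A mutates its argument in place — it overwrites the first maximum with `depth`; B does not).

-- ===== PORT A =====
-- the 'for index in range(len(numbers)): if numbers[index] == max(numbers): …; break' loop,
-- with max(numbers) recomputed at each iteration as in the Python; indices are in range,
-- so numbers[index] is ported as getD _ 0, and max(numbers) (nonempty here) as (max? _).getD 0.
def aScan (numbers : List Int) : List Nat → Nat
  | [] => 0        -- loop ends without break: max_n_index keeps its initial value 0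
  | i :: rest =>
      if numbers.getD i 0 = (PySem.List.max? numbers (fun x => x)).getD 0 then i
      else aScan numbers rest

-- termination of A's port (cited in decreasing_by)
theorem aScan_lt (numbers : List Int) (js : List Nat)
    (h : ∀ i ∈ js, i < numbers.length) (h0 : 0 < numbers.length) :
    aScan numbers js < numbers.length := by
  induction js with
  | nil => simpa [aScan] using h0
  | cons i rest ih =>
      simp only [aScan]
      split
      · exact h i (by simp)
      · exact ih (fun j hj => h j (by simp [hj]))

def find_depth (numbers : List Int) (depth : Int) : List Int :=
  if _h : numbers.length = 0 then []
  else
    let k := aScan numbers (List.range numbers.length)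
    let nums' := numbers.set k depth          -- numbers[max_n_index] = depth (in-place in Python)
    find_depth (nums'.take k) (depth + 1) ++ [nums'.getD k 0] ++
      find_depth (nums'.drop (k + 1)) (depth + 1)
termination_by numbers.length
decreasing_by
  · have hk := aScan_lt numbers (List.range numbers.length) (by simp) (by omega)
    simp [List.length_take, List.length_set]
    omega
  · simp [List.length_drop, List.length_set]
    omega

-- ===== PORT B =====
-- left scan: for j in range(i-1,-1,-1): if numbers[j] >= m: d += 1; m = numbers[j]
def bLoopL (nums : List Int) : List Nat → Int → Int → Int
  | [], _, d => d
  | j :: rest, m, d =>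
      if m ≤ nums.getD j 0 then bLoopL nums rest (nums.getD j 0) (d + 1)
      else bLoopL nums rest m d

-- right scan: for j in range(i+1, n): if numbers[j] > m: d += 1; m = numbers[j]
def bLoopR (nums : List Int) : List Nat → Int → Int → Int
  | [], _, d => d
  | j :: rest, m, d =>
      if m < nums.getD j 0 then bLoopR nums rest (nums.getD j 0) (d + 1)
      else bLoopR nums rest m d

def find_depth_alt (numbers : List Int) (depth : Int) : List Int :=
  (List.range numbers.length).map (fun i =>
    let d1 := bLoopL numbers ((List.range i).reverse) (numbers.getD i 0) depth
    bLoopR numbers (List.range' (i + 1) (numbers.length - (i + 1))) (numbers.getD i 0) d1)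

-- ===== PRECONDITION & SPEC =====
def Spec_find_depth (numbers : List Int) (depth : Int) (out : List Int) : Prop := out = find_depth_alt numbers depth
instance (numbers : List Int) (depth : Int) (out : List Int) : Decidable (Spec_find_depth numbers depth out) := by unfold Spec_find_depth; infer_instance

-- ===== CLAIM (what is proved, stated in full; the proofs are below) =====
def Claim_equal_find_depth : Prop := ∀ (numbers : List Int) (depth : Int), Dom_find_depth numbers depth → Spec_find_depth numbers depth (find_depth numbers depth)

-- ===== LEMMAS AND PROOFS =====

-- value-list versions of B's two loops (the loops only read nums.getD j 0 at each index)
def pureL : List Int → Int → Int → Int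
  | [], _, d => d
  | x :: rest, m, d => if m ≤ x then pureL rest x (d + 1) else pureL rest m d

def pureR : List Int → Int → Int → Int
  | [], _, d => d
  | x :: rest, m, d => if m < x then pureR rest x (d + 1) else pureR rest m d

theorem bLoopL_eq_pureL (nums : List Int) (js : List Nat) (m d : Int) :
    bLoopL nums js m d = pureL (js.map (fun j => nums.getD j 0)) m d := by
  induction js generalizing m d with
  | nil => rfl
  | cons j rest ih => simp only [bLoopL, List.map_cons, pureL]; split_ifs <;> exact ih ..

theorem bLoopR_eq_pureR (nums : List Int) (js : List Nat) (m d : Int) :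
    bLoopR nums js m d = pureR (js.map (fun j => nums.getD j 0)) m d := by
  induction js generalizing m d with
  | nil => rfl
  | cons j rest ih => simp only [bLoopR, List.map_cons, pureR]; split_ifs <;> exact ih ..

theorem pureL_add (l : List Int) (m d c : Int) : pureL l m (d + c) = pureL l m d + c := by
  induction l generalizing m d with
  | nil => rfl
  | cons x rest ih =>
      simp only [pureL]; split_ifs
      · rw [show d + c + 1 = (d + 1) + c by ring, ih]
      · exact ih ..

theorem pureR_add (l : List Int) (m d c : Int) : pureR l m (d + c) = pureR l m d + c := by
  induction l generalizing m d with
  | nil => rfl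
  | cons x rest ih =>
      simp only [pureR]; split_ifs
      · rw [show d + c + 1 = (d + 1) + c by ring, ih]
      · exact ih ..

theorem pureL_append (l₁ l₂ : List Int) (m d : Int) :
    pureL (l₁ ++ l₂) m d = pureL l₂ (l₁.foldl max m) (pureL l₁ m d) := by
  induction l₁ generalizing m d with
  | nil => rfl
  | cons x rest ih =>
      simp only [List.cons_append, pureL, List.foldl_cons]
      split_ifs with h
      · rw [ih, max_eq_right h]
      · rw [ih, max_eq_left (not_le.mp h).le]

theorem pureR_append (l₁ l₂ : List Int) (m d : Int) :
    pureR (l₁ ++ l₂) m d = pureR l₂ (l₁.foldl max m) (pureR l₁ m d) := by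
  induction l₁ generalizing m d with
  | nil => rfl
  | cons x rest ih =>
      simp only [List.cons_append, pureR, List.foldl_cons]
      split_ifs with h
      · rw [ih, max_eq_right (le_of_lt h)]
      · rw [ih, max_eq_left (not_lt.mp h)]

theorem pureL_no (l : List Int) (m d : Int) (h : ∀ x ∈ l, x < m) : pureL l m d = d := by
  induction l with
  | nil => rfl
  | cons x rest ih =>
      have hx := h x (by simp)
      simp only [pureL, if_neg (not_le.mpr hx)]
      exact ih (fun y hy => h y (by simp [hy]))

theorem pureR_no (l : List Int) (m d : Int) (h : ∀ x ∈ l, x ≤ m) : pureR l m d = d := by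
  induction l with
  | nil => rfl
  | cons x rest ih =>
      have hx := h x (by simp)
      simp only [pureR, if_neg (not_lt.mpr hx)]
      exact ih (fun y hy => h y (by simp [hy]))

theorem pureL_cons_big (l : List Int) (m M d : Int) (hm : m ≤ M) (h : ∀ x ∈ l, x < M) :
    pureL (M :: l) m d = d + 1 := by
  simp only [pureL, if_pos hm]; exact pureL_no l M (d + 1) h

theorem pureR_cons_big (l : List Int) (m M d : Int) (hm : m < M) (h : ∀ x ∈ l, x ≤ M) :
    pureR (M :: l) m d = d + 1 := by
  simp only [pureR, if_pos hm]; exact pureR_no l M (d + 1) h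

theorem foldl_max_le (l : List Int) (m M : Int) (h : ∀ x ∈ l, x ≤ M) (hm : m ≤ M) :
    l.foldl max m ≤ M := by
  induction l generalizing m with
  | nil => exact hm
  | cons x rest ih =>
      exact ih _ (fun y hy => h y (by simp [hy])) (max_le hm (h x (by simp)))

theorem foldl_max_lt (l : List Int) (m M : Int) (h : ∀ x ∈ l, x < M) (hm : m < M) :
    l.foldl max m < M := by
  induction l generalizing m with
  | nil => exact hm
  | cons x rest ih =>
      exact ih _ (fun y hy => h y (by simp [hy])) (max_lt hm (h x (by simp)))

-- first-match characterisation of A's argmax scan over a contiguous index range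
theorem aScan_range' (numbers : List Int) (s t : Nat)
    (hex : ∃ j, s ≤ j ∧ j < s + t ∧
      numbers.getD j 0 = (PySem.List.max? numbers (fun x => x)).getD 0) :
    s ≤ aScan numbers (List.range' s t) ∧ aScan numbers (List.range' s t) < s + t ∧
    numbers.getD (aScan numbers (List.range' s t)) 0 =
      (PySem.List.max? numbers (fun x => x)).getD 0 ∧
    ∀ j, s ≤ j → j < aScan numbers (List.range' s t) →
      numbers.getD j 0 ≠ (PySem.List.max? numbers (fun x => x)).getD 0 := by
  induction t generalizing s with
  | zero => obtain ⟨j, h1, h2, _⟩ := hex; omega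
  | succ t ih =>
      rw [List.range'_succ]
      simp only [aScan]
      split_ifs with hs
      · exact ⟨le_refl s, by omega, hs, fun j hj1 hj2 => by omega⟩
      · obtain ⟨j, h1, h2, h3⟩ := hex
        have hj' : s + 1 ≤ j := by
          rcases Nat.eq_or_lt_of_le h1 with h | h
          · exact absurd (h ▸ h3) hs
          · exact h
        obtain ⟨g1, g2, g3, g4⟩ := ih (s + 1) ⟨j, hj', by omega, h3⟩
        refine ⟨by omega, by omega, g3, fun j' hj1' hj2' => ?_⟩
        rcases Nat.eq_or_lt_of_le hj1' with h | h
        · exact h ▸ hs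
        · exact g4 j' h hj2'

theorem getD_take (l : List Int) (k j : Nat) (h : j < k) :
    (l.take k).getD j 0 = l.getD j 0 := by
  simp [List.getD_eq_getElem?_getD, h]

theorem getD_drop (l : List Int) (k j : Nat) :
    (l.drop k).getD j 0 = l.getD (k + j) 0 := by
  simp [List.getD_eq_getElem?_getD, List.getElem?_drop]

-- the per-index element of B's output
def elemB (nums : List Int) (depth : Int) (i : Nat) : Int :=
  bLoopR nums (List.range' (i + 1) (nums.length - (i + 1))) (nums.getD i 0)
    (bLoopL nums ((List.range i).reverse) (nums.getD i 0) depth)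

theorem alt_eq_map (nums : List Int) (depth : Int) :
    find_depth_alt nums depth = (List.range nums.length).map (elemB nums depth) := rfl

theorem elemB_lt (numbers : List Int) (depth : Int) (k i : Nat)
    (hk : k < numbers.length) (hi : i < k)
    (hmax : ∀ j, j < numbers.length → numbers.getD j 0 ≤ numbers.getD k 0)
    (hfirst : ∀ j, j < k → numbers.getD j 0 < numbers.getD k 0) :
    elemB numbers depth i = elemB (numbers.take k) (depth + 1) i := by
  have hlen : (numbers.take k).length = k := by simp [hk.le]
  unfold elemB
  rw [bLoopL_eq_pureL, bLoopR_eq_pureR, bLoopL_eq_pureL, bLoopR_eq_pureR, hlen]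
  have hvi : (numbers.take k).getD i 0 = numbers.getD i 0 := getD_take _ _ _ hi
  have hVL : ((List.range i).reverse.map fun j => (numbers.take k).getD j 0) =
      (List.range i).reverse.map fun j => numbers.getD j 0 := by
    refine List.map_congr_left fun j hj => ?_
    simp only [List.mem_reverse, List.mem_range] at hj
    exact getD_take _ _ _ (by omega)
  have hV1 : ((List.range' (i + 1) (k - (i + 1))).map fun j => (numbers.take k).getD j 0) =
      (List.range' (i + 1) (k - (i + 1))).map fun j => numbers.getD j 0 := by
    refine List.map_congr_left fun j hj => ?_
    simp only [List.mem_range'_1] at hj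
    exact getD_take _ _ _ (by omega)
  rw [hvi, hVL, hV1]
  have hsplit : List.range' (i + 1) (numbers.length - (i + 1)) =
      List.range' (i + 1) (k - (i + 1)) ++ k :: List.range' (k + 1) (numbers.length - (k + 1)) := by
    have h2 : numbers.length - k = (numbers.length - (k + 1)) + 1 := by omega
    have h3 : k :: List.range' (k + 1) (numbers.length - (k + 1)) =
        List.range' k (numbers.length - k) 1 := by
      rw [h2, List.range'_succ]
    rw [h3]
    have h4 : (i + 1) + 1 * (k - (i + 1)) = k := by omega
    rw [show List.range' k (numbers.length - k) 1 = List.range' ((i + 1) + 1 * (k - (i + 1))) (numbers.length - k) 1 from by rw [h4]]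
    rw [List.range'_append]
    congr 1
    omega
  rw [hsplit, List.map_append, List.map_cons, pureR_append, pureR_cons_big]
  · rw [pureL_add _ _ depth 1, pureR_add]
  · refine foldl_max_lt _ _ _ ?_ (hfirst i hi)
    intro x hx
    simp only [List.mem_map, List.mem_range'_1] at hx
    obtain ⟨j, hj, rfl⟩ := hx
    exact hfirst j (by omega)
  · intro x hx
    simp only [List.mem_map, List.mem_range'_1] at hx
    obtain ⟨j, hj, rfl⟩ := hx
    exact hmax j (by omega)

theorem elemB_k (numbers : List Int) (depth : Int) (k : Nat)
    (_hk : k < numbers.length)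
    (hmax : ∀ j, j < numbers.length → numbers.getD j 0 ≤ numbers.getD k 0)
    (hfirst : ∀ j, j < k → numbers.getD j 0 < numbers.getD k 0) :
    elemB numbers depth k = depth := by
  unfold elemB
  rw [bLoopL_eq_pureL, bLoopR_eq_pureR]
  rw [pureL_no _ _ _ (by
    intro x hx
    simp only [List.mem_map, List.mem_reverse, List.mem_range] at hx
    obtain ⟨j, hj, rfl⟩ := hx
    exact hfirst j hj)]
  exact pureR_no _ _ _ (by
    intro x hx
    simp only [List.mem_map, List.mem_range'_1] at hx
    obtain ⟨j, hj, rfl⟩ := hx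
    exact hmax j (by omega))

theorem elemB_gt (numbers : List Int) (depth : Int) (k t : Nat)
    (hk : k < numbers.length) (ht : k + 1 + t < numbers.length)
    (hmax : ∀ j, j < numbers.length → numbers.getD j 0 ≤ numbers.getD k 0)
    (hfirst : ∀ j, j < k → numbers.getD j 0 < numbers.getD k 0) :
    elemB numbers depth (k + 1 + t) = elemB (numbers.drop (k + 1)) (depth + 1) t := by
  have hyslen : (numbers.drop (k + 1)).length = numbers.length - (k + 1) := by simp
  unfold elemB
  rw [bLoopL_eq_pureL, bLoopR_eq_pureR, bLoopL_eq_pureL, bLoopR_eq_pureR, hyslen]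
  have hvt : (numbers.drop (k + 1)).getD t 0 = numbers.getD (k + 1 + t) 0 := getD_drop _ _ _
  -- split the descending left index list at position k
  have hL : (List.range (k + 1 + t)).reverse =
      ((List.range t).map fun u => k + 1 + u).reverse ++ k :: (List.range k).reverse := by
    rw [List.range_add, List.range_succ, List.reverse_append, List.reverse_append]
    simp
  have hW1 : (((List.range t).map fun u => k + 1 + u).reverse.map fun j => numbers.getD j 0) =
      ((List.range t).reverse.map fun u => (numbers.drop (k + 1)).getD u 0) := by
    rw [← List.map_reverse, List.map_map]
    exact List.map_congr_left fun u _ => (getD_drop _ _ _).symm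
  rw [hL, List.map_append, List.map_cons, hW1, pureL_append, pureL_cons_big, hvt]
  · -- right loops: same value lists after an index shift
    have hR : ((List.range' (k + 1 + t + 1) (numbers.length - (k + 1 + t + 1))).map
          fun j => numbers.getD j 0) =
        ((List.range' (t + 1) (numbers.length - (k + 1) - (t + 1))).map
          fun u => (numbers.drop (k + 1)).getD u 0) := by
      rw [List.range'_eq_map_range, List.range'_eq_map_range, List.map_map, List.map_map]
      rw [show numbers.length - (k + 1 + t + 1) = numbers.length - (k + 1) - (t + 1) from by omega]
      refine List.map_congr_left fun u _ => ?_
      simp only [Function.comp_apply]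
      rw [getD_drop]
      congr 1
      omega
    rw [hR, pureL_add _ _ depth 1, pureR_add]
  · -- running max over the right-part values stays ≤ the maximum
    refine foldl_max_le _ _ _ ?_ (hmax (k + 1 + t) ht)
    intro x hx
    simp only [List.mem_map, List.mem_reverse, List.mem_range] at hx
    obtain ⟨j, hj, rfl⟩ := hx
    rw [getD_drop]
    exact hmax (k + 1 + j) (by omega)
  · intro x hx
    simp only [List.mem_map, List.mem_reverse, List.mem_range] at hx
    obtain ⟨j, hj, rfl⟩ := hx
    exact hfirst j hj

theorem alt_split (numbers : List Int) (depth : Int) (k : Nat)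
    (hk : k < numbers.length)
    (hmax : ∀ j, j < numbers.length → numbers.getD j 0 ≤ numbers.getD k 0)
    (hfirst : ∀ j, j < k → numbers.getD j 0 < numbers.getD k 0) :
    find_depth_alt numbers depth =
      find_depth_alt (numbers.take k) (depth + 1) ++ [depth] ++
        find_depth_alt (numbers.drop (k + 1)) (depth + 1) := by
  have hlen : (numbers.take k).length = k := by simp [hk.le]
  have hyslen : (numbers.drop (k + 1)).length = numbers.length - (k + 1) := by simp
  rw [alt_eq_map, alt_eq_map, alt_eq_map, hlen, hyslen]
  have hn : numbers.length = (k + 1) + (numbers.length - (k + 1)) := by omega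
  conv_lhs => rw [hn, List.range_add, List.range_succ]
  rw [List.map_append, List.map_append, List.map_map]
  congr 1
  congr 1
  · exact List.map_congr_left fun i hi =>
      elemB_lt numbers depth k i hk (List.mem_range.mp hi) hmax hfirst
  · rw [List.map_singleton, elemB_k numbers depth k hk hmax hfirst]
  · exact List.map_congr_left fun t htm => by
      have ht : t < numbers.length - (k + 1) := List.mem_range.mp htm
      exact elemB_gt numbers depth k t hk (by omega) hmax hfirst

theorem find_depth_unfold (numbers : List Int) (depth : Int) (h : ¬ numbers.length = 0) :
    find_depth numbers depth =
      find_depth ((numbers.set (aScan numbers (List.range numbers.length)) depth).take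
          (aScan numbers (List.range numbers.length))) (depth + 1) ++
        [(numbers.set (aScan numbers (List.range numbers.length)) depth).getD
          (aScan numbers (List.range numbers.length)) 0] ++
        find_depth ((numbers.set (aScan numbers (List.range numbers.length)) depth).drop
          (aScan numbers (List.range numbers.length) + 1)) (depth + 1) := by
  conv_lhs => rw [find_depth]
  rw [dif_neg h]

theorem find_depth_eq_alt (numbers : List Int) (depth : Int) :
    find_depth numbers depth = find_depth_alt numbers depth := by
  suffices H : ∀ (n : Nat) (nums : List Int) (d : Int), nums.length ≤ n →
      find_depth nums d = find_depth_alt nums d from H numbers.length numbers depth le_rfl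
  intro n
  induction n with
  | zero =>
      intro nums d h
      have h0 : nums.length = 0 := by omega
      rw [find_depth, dif_pos h0, alt_eq_map, h0]
      rfl
  | succ n ih =>
      intro nums d h
      by_cases h0 : nums.length = 0
      · rw [find_depth, dif_pos h0, alt_eq_map, h0]
        rfl
      · cases hmx : PySem.List.max? nums (fun x => x) with
        | none =>
            exact absurd ((PySem.List.max?_eq_none_iff _ _).mp hmx)
              (fun he => h0 (by simp [he]))
        | some m =>
            have hmem := PySem.List.max?_mem hmx
            have hle : ∀ y ∈ nums, y ≤ m := PySem.List.max?_isMax hmx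
            have hval : ∀ i, (hi : i < nums.length) → nums.getD i 0 = nums[i] := by
              intro i hi
              simp [List.getD_eq_getElem?_getD, List.getElem?_eq_getElem hi]
            obtain ⟨j0, hj0, hget⟩ := List.getElem_of_mem hmem
            have hsc := aScan_range' nums 0 nums.length
              ⟨j0, by omega, by omega, by rw [hval j0 hj0, hget, hmx]; rfl⟩
            rw [← List.range_eq_range'] at hsc
            obtain ⟨-, hklt, hkval, hkmin⟩ := hsc
            set k := aScan nums (List.range nums.length) with hkdef
            have hklt' : k < nums.length := by omega
            rw [hmx] at hkval hkmin
            simp only [Option.getD_some] at hkval hkmin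
            have hmax : ∀ j, j < nums.length → nums.getD j 0 ≤ nums.getD k 0 := by
              intro j hj
              rw [hkval, hval j hj]
              exact hle _ (List.getElem_mem hj)
            have hfirst : ∀ j, j < k → nums.getD j 0 < nums.getD k 0 := by
              intro j hj
              have h1 := hmax j (by omega)
              have h2 := hkmin j (by omega) hj
              rw [← hkval] at h2
              exact lt_of_le_of_ne h1 h2
            have hset_take : (nums.set k d).take k = nums.take k := by
              rw [List.take_set]
              exact List.set_eq_of_length_le (by simp)
            have hset_drop : (nums.set k d).drop (k + 1) = nums.drop (k + 1) := by
              rw [List.drop_set, if_pos (Nat.lt_succ_self k)]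
            have hset_get : (nums.set k d).getD k 0 = d := by
              simp [List.getD_eq_getElem?_getD, hklt']
            rw [find_depth_unfold nums d h0, ← hkdef, hset_take, hset_drop, hset_get]
            rw [ih (nums.take k) (d + 1) (by simp; omega),
              ih (nums.drop (k + 1)) (d + 1) (by simp; omega)]
            exact (alt_split nums d k hklt' hmax hfirst).symm

-- ===== VERDICT (by name: the statement is the Claim_ definition above) =====
theorem find_depth_spec : Claim_equal_find_depth := by
  intro numbers depth _
  unfold Spec_find_depth
  exact find_depth_eq_alt numbers depth
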